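-- pv_equiv track=rewrite | github.com/cuauhtlahuac/100DaysOfPythonCode | day7/day-7-hangman-5/main.py | update_letters_to_display
-- ===== SOURCE A (Python) =====
-- def update_letters_to_display(letters):
--     display = ""
--     index = 0
--     for letter in letters:
--         if(index >= 3):
--             display += "\n" + " " * 8
--             index = 0
--         display += f"[ {letter} ]"
--         index += 1
--     return display
-- ===== SOURCE B (Python) =====
-- def update_letters_to_display(letters):
--     chunks = [letters[i:i + 3] for i in range(0, len(letters), 3)]
--     sep = "\n" + " " * 8
--     return sep.join("".join(f"[ {l} ]" for l in chunk) for chunk in chunks)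
-- ===== Notes on version B (the rewrite author's own statement) =====
-- stated objective: simpler
-- what changed: Replaces the flat loop with a per-letter counter/sentinel by a chunk-then-join decomposition: slice the list into groups of 3, format each group, and join groups with the newline+8-space separator.
import Mathlib
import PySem

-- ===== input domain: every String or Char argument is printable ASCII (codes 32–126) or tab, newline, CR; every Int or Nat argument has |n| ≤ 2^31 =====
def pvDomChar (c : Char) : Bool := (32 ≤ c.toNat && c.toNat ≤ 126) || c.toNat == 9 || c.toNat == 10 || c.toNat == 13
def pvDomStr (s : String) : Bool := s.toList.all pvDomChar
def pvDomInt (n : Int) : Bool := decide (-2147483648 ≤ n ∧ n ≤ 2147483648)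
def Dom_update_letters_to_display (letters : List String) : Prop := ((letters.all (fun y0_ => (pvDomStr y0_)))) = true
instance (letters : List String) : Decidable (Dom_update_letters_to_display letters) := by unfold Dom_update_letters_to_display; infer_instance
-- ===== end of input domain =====

-- B replaces A's flat loop with a per-letter wrap counter by a chunk-into-3-then-join decomposition (objective: simpler).

-- ===== PORT A =====
-- A: one pass, state (display, index); when index ≥ 3 emit "\n" + 8 spaces and reset.
def update_letters_to_display (letters : List String) : String :=
  (letters.foldl
    (fun st letter =>
      let st' := if st.2 ≥ 3 then (st.1 ++ ("\n" ++ String.mk (List.replicate 8 ' ')), (0 : Int)) else st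
      (st'.1 ++ ("[ " ++ letter ++ " ]"), st'.2 + 1))
    ("", (0 : Int))).1

-- ===== PORT B =====
-- B: slice into chunks of 3, format each chunk, join chunks with the separator.
def pvChunk3 : List String → List (List String)
  | a :: b :: c :: rest => [a, b, c] :: pvChunk3 rest
  | [] => []
  | ls => [ls]

def pvLine (chunk : List String) : String :=
  String.join (chunk.map (fun l => "[ " ++ l ++ " ]"))

-- sep.join(...) for sep = "\n" + " " * 8
def pvJoinSep : List String → String
  | [] => ""
  | [x] => x
  | x :: y :: ys => x ++ ("\n" ++ String.mk (List.replicate 8 ' ')) ++ pvJoinSep (y :: ys)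

def update_letters_to_display_alt (letters : List String) : String :=
  pvJoinSep ((pvChunk3 letters).map pvLine)

-- ===== PRECONDITION & SPEC =====
def Spec_update_letters_to_display (letters : List String) (out : String) : Prop := out = update_letters_to_display_alt letters
instance (letters : List String) (out : String) : Decidable (Spec_update_letters_to_display letters out) := by unfold Spec_update_letters_to_display; infer_instance

-- ===== CLAIM (what is proved, stated in full; the proofs are below) =====
def Claim_equal_update_letters_to_display : Prop := ∀ (letters : List String), Dom_update_letters_to_display letters → Spec_update_letters_to_display letters (update_letters_to_display letters)

-- ===== LEMMAS AND PROOFS =====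

def pvSep : String := "\n" ++ String.mk (List.replicate 8 ' ')

def pvFmt (l : String) : String := "[ " ++ l ++ " ]"

-- A's loop body as a named step function (definitionally the one in the port).
def pvStep (st : String × Int) (letter : String) : String × Int :=
  let st' := if st.2 ≥ 3 then (st.1 ++ pvSep, (0 : Int)) else st
  (st'.1 ++ pvFmt letter, st'.2 + 1)

theorem update_letters_to_display_eq_foldl (letters : List String) :
    update_letters_to_display letters = (letters.foldl pvStep ("", 0)).1 := rfl

-- "separator ++ rest-of-output" when ls nonempty, "" when empty.
def pvTail (ls : List String) : String :=
  match ls with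
  | [] => ""
  | _ => pvSep ++ update_letters_to_display_alt ls

theorem pvChunk3_cons (a : String) (as : List String) :
    ∃ h t, pvChunk3 (a :: as) = h :: t := by
  match as with
  | [] => exact ⟨[a], [], rfl⟩
  | [b] => exact ⟨[a, b], [], rfl⟩
  | b :: c :: rest => exact ⟨[a, b, c], pvChunk3 rest, rfl⟩

theorem alt_cons3 (a b c : String) (rest : List String) :
    update_letters_to_display_alt (a :: b :: c :: rest) =
      (pvFmt a ++ pvFmt b ++ pvFmt c) ++ pvTail rest := by
  show pvJoinSep (pvLine [a, b, c] :: (pvChunk3 rest).map pvLine) = _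
  have hline : pvLine [a, b, c] = pvFmt a ++ pvFmt b ++ pvFmt c := by
    simp [pvLine, pvFmt, String.join]
  match rest with
  | [] => simp [pvChunk3, pvJoinSep, pvTail, hline]
  | r :: rs =>
    obtain ⟨h, t, hc⟩ := pvChunk3_cons r rs
    simp only [pvTail, hc, List.map_cons, pvJoinSep, hline,
      update_letters_to_display_alt, pvSep]
    simp [String.append_assoc]

-- the loop from index 3 produces s followed by pvTail ls
theorem loopA3 : ∀ (ls : List String) (s : String),
    (List.foldl pvStep (s, (3 : Int)) ls).1 = s ++ pvTail ls
  | [], s => by simp [pvTail]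
  | [a], s => by
    simp [pvStep, pvTail, update_letters_to_display_alt, pvChunk3, pvJoinSep,
      pvLine, pvFmt, pvSep, String.join, String.append_assoc]
  | [a, b], s => by
    norm_num [pvStep, pvTail, update_letters_to_display_alt, pvChunk3, pvJoinSep,
      pvLine, pvFmt, pvSep, String.join, String.append_assoc]
  | a :: b :: c :: rest, s => by
    have ih := loopA3 rest (s ++ pvSep ++ pvFmt a ++ pvFmt b ++ pvFmt c)
    have hstep : List.foldl pvStep (s, (3 : Int)) (a :: b :: c :: rest) =
        List.foldl pvStep (s ++ pvSep ++ pvFmt a ++ pvFmt b ++ pvFmt c, 3) rest := by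
      norm_num [pvStep]
    rw [hstep, ih,
      show pvTail (a :: b :: c :: rest) = pvSep ++ update_letters_to_display_alt (a :: b :: c :: rest) from rfl,
      alt_cons3 a b c rest]
    simp [String.append_assoc]

theorem main_eq : ∀ (letters : List String),
    update_letters_to_display letters = update_letters_to_display_alt letters
  | [] => rfl
  | [a] => by
    simp [update_letters_to_display, update_letters_to_display_alt, pvChunk3,
      pvJoinSep, pvLine, String.join]
  | [a, b] => by
    norm_num [update_letters_to_display, update_letters_to_display_alt, pvChunk3,
      pvJoinSep, pvLine, String.join, String.append_assoc]
  | a :: b :: c :: rest => by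
    rw [update_letters_to_display_eq_foldl]
    have hstep : List.foldl pvStep ("", (0 : Int)) (a :: b :: c :: rest) =
        List.foldl pvStep (pvFmt a ++ pvFmt b ++ pvFmt c, 3) rest := by
      norm_num [pvStep, pvFmt]
    rw [hstep, loopA3 rest, alt_cons3 a b c rest]

-- ===== VERDICT (by name: the statement is the Claim_ definition above) =====
theorem update_letters_to_display_spec : Claim_equal_update_letters_to_display := by
  intro letters _
  exact main_eq letters
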